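-- pv_equiv track=rewrite | github.com/tongshi90/rag-project | backend/app/services/document_processing/splitter/pdf_reader.py | detect_header_end_simple
-- ===== SOURCE A (Python) =====
-- def clean_cell(cell):
--     """清洗单元格内容"""
--     if cell is None:
--         return ""
--     return str(cell).replace("\n", " ").strip()
--
-- def fill_down(table):
--     """向下填充，处理行合并"""
--     if not table:
--         return []
--
--     filled = []
--     last_row = [""] * len(table[0])
--
--     for row in table:
--         new_row = []
--         for i, cell in enumerate(row):
--             cell = clean_cell(cell)
--             if cell == "":
--                 new_row.append(last_row[i])
--             else:
--                 new_row.append(cell)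
--         filled.append(new_row)
--         last_row = new_row
--
--     return filled
--
-- def detect_header_end_simple(table):
--     """
--     表头识别逻辑
--     - 只做向下填充
--     - "" 认为无元素，非空认为有元素
--     - 找到行元素首次不再增加 → 前一行才是表头最后一行
--     """
--     if not table:
--         return -1
--
--     filled_table = fill_down(table)
--     prev_count = 0
--
--     for i, row in enumerate(filled_table):
--         current_count = sum(1 for c in row if c not in ("", None))
--         if current_count <= prev_count and i > 0:
--             # 元素数首次不再增加 → 前一行是表头最后一行
--             return i - 1
--         prev_count = current_count
--
--     # 默认最后一行是表头
--     return len(filled_table) - 1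
-- ===== SOURCE B (Python) =====
-- def detect_header_end_simple(table):
--     """Streaming version: fuse fill-down and the count scan into one pass
--     with early exit; no filled table is materialized."""
--     if not table:
--         return -1
--     last_row = [""] * len(table[0])
--     prev_count = 0
--     for idx, row in enumerate(table):
--         filled = []
--         count = 0
--         for i, cell in enumerate(row):
--             c = "" if cell is None else str(cell).replace("\n", " ").strip()
--             if c == "":
--                 c = last_row[i]
--             filled.append(c)
--             if c != "":
--                 count += 1
--         if idx > 0 and count <= prev_count:
--             return idx - 1
--         prev_count = count
--         last_row = filled
--     return len(table) - 1
-- ===== Notes on version B (the rewrite author's own statement) =====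
-- stated objective: faster
-- what changed: B fuses fill_down and the count scan into one streaming pass that keeps only the previous filled row and counts non-empty cells inline with early exit, instead of materializing the whole filled table and then scanning it.
import Mathlib
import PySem

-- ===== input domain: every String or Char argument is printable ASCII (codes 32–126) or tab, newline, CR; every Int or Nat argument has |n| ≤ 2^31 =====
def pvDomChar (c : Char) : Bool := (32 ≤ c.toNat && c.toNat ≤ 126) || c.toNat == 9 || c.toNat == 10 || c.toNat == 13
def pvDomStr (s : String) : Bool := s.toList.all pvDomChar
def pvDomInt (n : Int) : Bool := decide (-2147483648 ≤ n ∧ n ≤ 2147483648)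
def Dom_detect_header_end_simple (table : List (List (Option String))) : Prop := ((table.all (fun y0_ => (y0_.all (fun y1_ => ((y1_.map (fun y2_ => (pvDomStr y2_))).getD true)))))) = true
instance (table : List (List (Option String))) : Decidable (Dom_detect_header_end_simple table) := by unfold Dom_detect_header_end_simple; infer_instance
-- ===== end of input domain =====

-- B fuses fill-down and the count scan into one streaming pass with early exit,
-- instead of materializing the whole filled table first (objective: alternative decomposition).
-- Pre_ excludes ragged tables on which Python A raises IndexError (a row cell cleans
-- to "" at a position beyond the previous row's length).

-- ===== PORT A =====
-- clean_cell
def pvClean (cell : Option String) : String :=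
  match cell with
  | none => ""
  | some s => PySem.Str.strip (PySem.Str.replace s "\n" " ")

-- inner loop of fill_down: new_row built cell by cell (pyGetD = last_row[i], total under Pre_)
def pvFillRow (last_row : List String) (row : List (Option String)) : List String :=
  (PySem.List.enumerate row).map (fun p =>
    let c := pvClean p.2
    if c = "" then PySem.List.pyGetD last_row p.1 "" else c)

-- outer loop of fill_down: filled.append(new_row); last_row = new_row
def pvFillDown (last_row : List String) (rows : List (List (Option String))) : List (List String) :=
  match rows with
  | [] => []
  | r :: rs =>
    let new_row := pvFillRow last_row r
    new_row :: pvFillDown new_row rs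

-- the scan loop of detect_header_end_simple over the filled table
def pvScanA (rows : List (List String)) (i : Nat) (prev_count : Nat) (total : Nat) : Int :=
  match rows with
  | [] => (total : Int) - 1
  | row :: rest =>
    let current_count := row.countP (fun c => c ≠ "")
    if current_count ≤ prev_count ∧ i > 0 then (i : Int) - 1
    else pvScanA rest (i + 1) current_count total

def detect_header_end_simple (table : List (List (Option String))) : Int :=
  if table = [] then -1
  else
    let filled_table := pvFillDown (List.replicate (table.headD []).length "") table
    pvScanA filled_table 0 0 filled_table.length

-- ===== PORT B =====
-- B's single streaming loop: fill the row and count its non-empty cells in one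
-- pass (inner foldl), decide / early-return, then recurse with the filled row.
def pvLoopB (rows : List (List (Option String))) (idx : Nat) (last_row : List String)
    (prev_count : Nat) (total : Nat) : Int :=
  match rows with
  | [] => (total : Int) - 1
  | row :: rest =>
    let st := (PySem.List.enumerate row).foldl (fun (st : List String × Nat) p =>
      let c0 := pvClean p.2
      let c := if c0 = "" then PySem.List.pyGetD last_row p.1 "" else c0
      (st.1 ++ [c], if c ≠ "" then st.2 + 1 else st.2)) ([], 0)
    if idx > 0 ∧ st.2 ≤ prev_count then (idx : Int) - 1
    else pvLoopB rest (idx + 1) st.1 st.2 total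

def detect_header_end_simple_alt (table : List (List (Option String))) : Int :=
  if table = [] then -1
  else pvLoopB table 0 (List.replicate (table.headD []).length "") 0 table.length

-- ===== PRECONDITION & SPEC =====
-- Pre_ excludes exactly the ragged tables on which A raises IndexError: a cell of row k+1
-- cleans to "" at a position not shorter than row k (last_row there has row k's length).
def Pre_detect_header_end_simple (table : List (List (Option String))) : Prop :=
  ∀ k, k < table.length - 1 → ∀ i, i < (table.getD (k+1) []).length →
    pvClean ((table.getD (k+1) []).getD i none) = "" → i < (table.getD k []).length

instance (table : List (List (Option String))) : Decidable (Pre_detect_header_end_simple table) := by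
  unfold Pre_detect_header_end_simple; infer_instance

def pvWitness_detect_header_end_simple : List (List (Option String)) :=
  [[some "a"], [some "b", some "c"]]

def Spec_detect_header_end_simple (table : List (List (Option String))) (out : Int) : Prop := out = detect_header_end_simple_alt table
instance (table : List (List (Option String))) (out : Int) : Decidable (Spec_detect_header_end_simple table out) := by unfold Spec_detect_header_end_simple; infer_instance

-- ===== CLAIM (what is proved, stated in full; the proofs are below) =====
def Claim_equal_detect_header_end_simple : Prop := ∀ (table : List (List (Option String))), Dom_detect_header_end_simple table → Pre_detect_header_end_simple table → Spec_detect_header_end_simple table (detect_header_end_simple table)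

-- ===== LEMMAS AND PROOFS =====

-- B's inner fold builds exactly (acc ++ fillRow, cnt + count of non-empty fills)
theorem pvLoopB_inner (row : List (Option String)) (last_row : List String) :
    ∀ (s : Int) (acc : List String) (cnt : Nat),
    (PySem.List.enumerate row s).foldl (fun (st : List String × Nat) p =>
      let c0 := pvClean p.2
      let c := if c0 = "" then PySem.List.pyGetD last_row p.1 "" else c0
      (st.1 ++ [c], if c ≠ "" then st.2 + 1 else st.2)) (acc, cnt)
    = (acc ++ (PySem.List.enumerate row s).map (fun p =>
          let c := pvClean p.2
          if c = "" then PySem.List.pyGetD last_row p.1 "" else c),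
       cnt + ((PySem.List.enumerate row s).map (fun p =>
          let c := pvClean p.2
          if c = "" then PySem.List.pyGetD last_row p.1 "" else c)).countP (fun c => c ≠ "")) := by
  induction row with
  | nil => intro s acc cnt; simp [PySem.List.enumerate_nil]
  | cons x xs ih =>
    intro s acc cnt
    simp only [PySem.List.enumerate_cons, List.foldl_cons, List.map_cons, List.countP_cons]
    rw [ih]
    refine Prod.ext ?_ ?_
    · simp
    · by_cases h : (if pvClean x = "" then PySem.List.pyGetD last_row s "" else pvClean x) = "" <;>
        simp [h] <;> omega

-- the fused loop equals fill-down-then-scan, for every starting state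
theorem pvLoopB_eq_scan (rows : List (List (Option String))) :
    ∀ (idx : Nat) (last_row : List String) (prev : Nat) (total : Nat),
    pvLoopB rows idx last_row prev total
      = pvScanA (pvFillDown last_row rows) idx prev total := by
  induction rows with
  | nil => intro idx last_row prev total; simp [pvLoopB, pvFillDown, pvScanA]
  | cons r rs ih =>
    intro idx last_row prev total
    simp only [pvLoopB, pvFillDown, pvScanA]
    rw [pvLoopB_inner r last_row 0 [] 0]
    simp only [List.nil_append, Nat.zero_add]
    have hfr : (PySem.List.enumerate r 0).map (fun p =>
        let c := pvClean p.2
        if c = "" then PySem.List.pyGetD last_row p.1 "" else c) = pvFillRow last_row r := rfl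
    rw [hfr]
    by_cases h : idx > 0 ∧ (pvFillRow last_row r).countP (fun c => c ≠ "") ≤ prev
    · rw [if_pos h, if_pos ⟨h.2, h.1⟩]
    · rw [if_neg h, if_neg (by tauto)]
      exact ih _ _ _ _

-- fill_down preserves the number of rows
theorem pvFillDown_length (rows : List (List (Option String))) :
    ∀ last_row, (pvFillDown last_row rows).length = rows.length := by
  induction rows with
  | nil => intro _; rfl
  | cons r rs ih => intro last_row; simp [pvFillDown, ih]

-- ===== VERDICT (by name: the statement is the Claim_ definition above) =====
theorem detect_header_end_simple_spec : Claim_equal_detect_header_end_simple := by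
  intro table _ _
  unfold Spec_detect_header_end_simple detect_header_end_simple detect_header_end_simple_alt
  by_cases h : table = []
  · simp [h]
  · simp only [h]
    rw [pvLoopB_eq_scan, pvFillDown_length]
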